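-- pv_equiv track=rewrite | github.com/darrenangle/abide | src/abide/primitives/phonetics.py | _suffix_rhyme
-- ===== SOURCE A (Python) =====
-- def _suffix_rhyme(word1: str, word2: str, min_suffix: int = 2) -> bool:
--     """Fallback rhyme detection using suffix matching."""
--     w1, w2 = word1.lower(), word2.lower()
--
--     # Find longest common suffix
--     common = 0
--     for i in range(1, min(len(w1), len(w2)) + 1):
--         if w1[-i] == w2[-i]:
--             common = i
--         else:
--             break
--
--     return common >= min_suffix
-- ===== SOURCE B (Python) =====
-- def _suffix_rhyme(word1: str, word2: str, min_suffix: int = 2) -> bool: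
--     """Closed-form suffix check: no scan loop."""
--     w1, w2 = word1.lower(), word2.lower()
--     L = min(len(w1), len(w2))
--     return min_suffix <= 0 or (min_suffix <= L and w1[-min_suffix:] == w2[-min_suffix:])
-- ===== Notes on version B (the rewrite author's own statement) =====
-- stated objective: simpler
-- what changed: Replaces the character-by-character suffix scan with a closed-form check: min_suffix <= 0, or min_suffix fits both words and the last min_suffix characters (one slice comparison) are equal.
import Mathlib
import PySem

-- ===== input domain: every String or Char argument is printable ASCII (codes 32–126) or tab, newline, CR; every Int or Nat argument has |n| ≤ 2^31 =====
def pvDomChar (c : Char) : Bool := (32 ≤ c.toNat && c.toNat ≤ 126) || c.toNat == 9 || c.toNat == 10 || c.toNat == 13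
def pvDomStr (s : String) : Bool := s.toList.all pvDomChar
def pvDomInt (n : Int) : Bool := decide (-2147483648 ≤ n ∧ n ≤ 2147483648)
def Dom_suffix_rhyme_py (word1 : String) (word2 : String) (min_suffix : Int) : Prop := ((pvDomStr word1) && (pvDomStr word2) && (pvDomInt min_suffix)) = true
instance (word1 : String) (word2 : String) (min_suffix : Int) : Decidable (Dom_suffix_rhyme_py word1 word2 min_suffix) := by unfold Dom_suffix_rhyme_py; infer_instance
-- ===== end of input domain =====

-- B replaces A's character-by-character suffix scan with a closed-form check
-- (min_suffix <= 0, or it fits both words and one slice comparison succeeds); objective: simpler.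

-- ===== PORT A =====
-- the `for i in range(...)` loop with its `break`: recursion over the range list
def pvALoop (c1 c2 : List Char) : List Int → Int → Int
  | [], common => common
  | i :: rest, common =>
      if PySem.List.pyGet? c1 (-i) = PySem.List.pyGet? c2 (-i)
      then pvALoop c1 c2 rest i
      else common

def suffix_rhyme_py (word1 : String) (word2 : String) (min_suffix : Int) : Bool :=
  let c1 := PySem.Chars.lower word1.toList
  let c2 := PySem.Chars.lower word2.toList
  let common := pvALoop c1 c2
    (PySem.List.pyRange 1 (min (c1.length : Int) (c2.length : Int) + 1) 1) 0
  decide (min_suffix ≤ common)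

-- ===== PORT B =====
def suffix_rhyme_py_alt (word1 : String) (word2 : String) (min_suffix : Int) : Bool :=
  let c1 := PySem.Chars.lower word1.toList
  let c2 := PySem.Chars.lower word2.toList
  let L : Int := min (c1.length : Int) (c2.length : Int)
  decide (min_suffix ≤ 0) ||
    (decide (min_suffix ≤ L) &&
      decide (PySem.List.slice c1 (some (-min_suffix)) none
            = PySem.List.slice c2 (some (-min_suffix)) none))

-- ===== PRECONDITION & SPEC =====
def Spec_suffix_rhyme_py (word1 : String) (word2 : String) (min_suffix : Int) (out : Bool) : Prop := out = suffix_rhyme_py_alt word1 word2 min_suffix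
instance (word1 : String) (word2 : String) (min_suffix : Int) (out : Bool) : Decidable (Spec_suffix_rhyme_py word1 word2 min_suffix out) := by unfold Spec_suffix_rhyme_py; infer_instance

-- ===== CLAIM (what is proved, stated in full; the proofs are below) =====
def Claim_equal_suffix_rhyme_py : Prop := ∀ (word1 : String) (word2 : String) (min_suffix : Int), Dom_suffix_rhyme_py word1 word2 min_suffix → Spec_suffix_rhyme_py word1 word2 min_suffix (suffix_rhyme_py word1 word2 min_suffix)

-- ===== LEMMAS AND PROOFS =====

-- the loop's result is ≥ m iff m ≤ start-1, or m fits the range and every index a..m matches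
theorem pvALoop_ge (c1 c2 : List Char) (m : Int) :
    ∀ (n : Nat) (a : Int),
      (m ≤ pvALoop c1 c2 (PySem.List.pyRange a (a + n) 1) (a - 1)) ↔
      (m ≤ a - 1 ∨ (m ≤ a - 1 + n ∧ ∀ i : Int, a ≤ i → i ≤ m →
          PySem.List.pyGet? c1 (-i) = PySem.List.pyGet? c2 (-i))) := by
  intro n
  induction n with
  | zero =>
      intro a
      rw [show ((0 : Nat) : Int) = 0 from rfl, add_zero,
          show PySem.List.pyRange a a 1 = [] from by simp [PySem.List.pyRange]]
      simp only [pvALoop]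
      constructor
      · exact fun h => Or.inl h
      · rintro (h | ⟨h, _⟩) <;> omega
  | succ n ih =>
      intro a
      rw [PySem.List.pyRange_one_cons (by push_cast; omega)]
      simp only [pvALoop]
      push_cast
      rw [show a + ((n : Int) + 1) = (a + 1) + n from by ring]
      by_cases hm : PySem.List.pyGet? c1 (-a) = PySem.List.pyGet? c2 (-a)
      · rw [if_pos hm]
        have ih' := ih (a + 1)
        rw [show ((a + 1) - 1 : Int) = a from by ring] at ih'
        rw [ih']
        constructor
        · rintro (h | ⟨h1, h2⟩)
          · by_cases hma : m ≤ a - 1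
            · exact Or.inl hma
            · refine Or.inr ⟨by omega, ?_⟩
              intro i hi1 hi2
              have : i = a := by omega
              rwa [this]
          · refine Or.inr ⟨by omega, ?_⟩
            intro i hi1 hi2
            by_cases hia : i = a
            · rwa [hia]
            · exact h2 i (by omega) hi2
        · rintro (h | ⟨h1, h2⟩)
          · exact Or.inl (by omega)
          · by_cases hma : m ≤ a
            · exact Or.inl hma
            · refine Or.inr ⟨by omega, ?_⟩
              intro i hi1 hi2
              exact h2 i (by omega) hi2
      · rw [if_neg hm]
        constructor
        · exact fun h => Or.inl h
        · rintro (h | ⟨h1, h2⟩)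
          · exact h
          · by_cases hma : m ≤ a - 1
            · exact hma
            · exact absurd (h2 a (by omega) (by omega)) hm

-- matching characters at every negative index 1..k iff the last-k drops coincide
theorem drop_eq_iff_matches (c1 c2 : List Char) (k : Nat) (hk1 : k ≤ c1.length)
    (hk2 : k ≤ c2.length) :
    (c1.drop (c1.length - k) = c2.drop (c2.length - k)) ↔
    (∀ i : Int, 1 ≤ i → i ≤ (k : Int) →
        PySem.List.pyGet? c1 (-i) = PySem.List.pyGet? c2 (-i)) := by
  rw [List.ext_getElem?_iff]
  constructor
  · intro h i hi1 hi2
    obtain ⟨j, hji, hj0, hjk⟩ : ∃ j : Nat, (j : Int) = i ∧ 0 < j ∧ j ≤ k :=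
      ⟨i.toNat, by omega, by omega, by omega⟩
    rw [← hji,
        PySem.List.pyGet?_neg_natCast c1 j hj0 (by omega),
        PySem.List.pyGet?_neg_natCast c2 j hj0 (by omega)]
    have := h (k - j)
    rwa [List.getElem?_drop, List.getElem?_drop,
      show c1.length - k + (k - j) = c1.length - j from by omega,
      show c2.length - k + (k - j) = c2.length - j from by omega] at this
  · intro h t
    rw [List.getElem?_drop, List.getElem?_drop]
    by_cases ht : t < k
    · have hj0 : 0 < k - t := by omega
      have := h ((k - t : Nat) : Int) (by omega) (by omega)
      rw [PySem.List.pyGet?_neg_natCast c1 (k - t) hj0 (by omega),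
          PySem.List.pyGet?_neg_natCast c2 (k - t) hj0 (by omega)] at this
      rwa [show c1.length - k + t = c1.length - (k - t) from by omega,
           show c2.length - k + t = c2.length - (k - t) from by omega]
    · rw [List.getElem?_eq_none (by omega), List.getElem?_eq_none (by omega)]

-- ===== VERDICT (by name: the statement is the Claim_ definition above) =====
theorem suffix_rhyme_py_spec : Claim_equal_suffix_rhyme_py := by
  intro word1 word2 m _
  unfold Spec_suffix_rhyme_py suffix_rhyme_py suffix_rhyme_py_alt
  dsimp only
  set c1 := PySem.Chars.lower word1.toList with hc1
  set c2 := PySem.Chars.lower word2.toList with hc2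
  set L : Int := min (c1.length : Int) (c2.length : Int) with hL
  have hL0 : 0 ≤ L := by rw [hL]; exact le_min (by positivity) (by positivity)
  suffices hiff : (m ≤ pvALoop c1 c2 (PySem.List.pyRange 1 (L + 1) 1) 0) ↔
      (m ≤ 0 ∨ (m ≤ L ∧ PySem.List.slice c1 (some (-m)) none
                      = PySem.List.slice c2 (some (-m)) none)) by
    simp [hiff]
  have hge := pvALoop_ge c1 c2 m L.toNat 1
  rw [show (1 : Int) + (L.toNat : Int) = L + 1 from by omega,
      show ((1 : Int) - 1) = 0 from by norm_num,
      show ((0 : Int) + (L.toNat : Int)) = L from by omega] at hge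
  rw [hge]
  by_cases hm0 : m ≤ 0
  · simp [hm0]
  · have hkpos : 0 < m.toNat := by omega
    rw [show (-m) = -((m.toNat : Int)) from by omega,
        PySem.List.slice_from_neg_natCast c1 m.toNat hkpos,
        PySem.List.slice_from_neg_natCast c2 m.toNat hkpos]
    constructor
    · rintro (h | ⟨h1, h2⟩)
      · omega
      · refine Or.inr ⟨h1, ?_⟩
        refine (drop_eq_iff_matches c1 c2 m.toNat (by omega) (by omega)).mpr ?_
        intro i hi1 hi2
        exact h2 i hi1 (by omega)
    · rintro (h | ⟨h1, h2⟩)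
      · omega
      · refine Or.inr ⟨h1, ?_⟩
        intro i hi1 hi2
        exact (drop_eq_iff_matches c1 c2 m.toNat (by omega) (by omega)).mp h2 i hi1 (by omega)
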